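-- pv_equiv track=rewrite | github.com/baroncurtin2/structy-solutions | structy/mixed_recall/token_replace.py | token_replace
-- ===== SOURCE A (Python) =====
-- def token_replace(s: str, tokens: dict[str, str]) -> str:
--     # n = length of string
--     # Time: O(n)
--     # Space: O(n)
--     i = 0
--     j = 1
--
--     result = []
--
--     while i < len(s):
--         if s[i] != "$":
--             result.append(s[i])
--             i += 1
--             j = i + 1
--         elif s[j] != "$":
--             j += 1
--         else:
--             key = s[i: j + 1]
--             result.append(tokens[key])
--             i = j + 1
--             j = i + 1
--
--     return "".join(result)
-- ===== SOURCE B (Python) =====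
-- def token_replace(s: str, tokens: dict[str, str]) -> str:
--     parts = s.split('$')
--     out = [parts[0]]
--     for tok, lit in zip(parts[1::2], parts[2::2]):
--         out.append(tokens['$' + tok + '$'])
--         out.append(lit)
--     return ''.join(out)
-- ===== Notes on version B (the rewrite author's own statement) =====
-- stated objective: faster
-- what changed: B replaces A's two-index per-character scanner (i/j cursor pair with manual token-boundary search and slicing) by a single split on '$' and one loop over the zipped (token, literal) segment pairs; Pre_ excludes exactly the inputs on which A raises (IndexError on an odd number of '$', KeyError on an unknown token).
import Mathlib
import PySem

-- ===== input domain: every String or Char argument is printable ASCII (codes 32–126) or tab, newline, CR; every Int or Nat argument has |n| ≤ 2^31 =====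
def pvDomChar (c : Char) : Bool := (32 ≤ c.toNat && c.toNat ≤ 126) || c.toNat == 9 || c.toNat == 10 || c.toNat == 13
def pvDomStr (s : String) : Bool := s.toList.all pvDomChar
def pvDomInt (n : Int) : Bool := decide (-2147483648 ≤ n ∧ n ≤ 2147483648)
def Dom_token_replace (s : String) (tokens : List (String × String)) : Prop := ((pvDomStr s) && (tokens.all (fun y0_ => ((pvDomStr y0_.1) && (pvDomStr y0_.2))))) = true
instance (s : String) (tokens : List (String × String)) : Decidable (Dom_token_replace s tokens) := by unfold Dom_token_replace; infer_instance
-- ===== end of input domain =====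

-- B replaces A's two-index character scanner by split-on-'$' once plus a loop over the
-- zipped (token, literal) segment pairs; same O(n) cost, a more idiomatic decomposition.
-- Pre_ excludes exactly the inputs on which A raises (IndexError on an odd number of '$',
-- KeyError on an unknown token); B returns a value on some of those but A returns on none.


-- ===== PORT A =====
-- A's while-loop over cursor pair (i, j); fuel = 2*len+2 suffices because i+j grows
-- each iteration and stays ≤ 2*len+2 on every run that Python finishes.
def tokenReplaceGo (cs : List Char) (d : PySem.Dict String String) :
    Nat → Nat → Nat → List String → List String
  | 0, _, _, result => result
  | fuel + 1, i, j, result =>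
    if i < cs.length then
      match PySem.List.pyGet? cs (i : Int) with
      | none => result        -- unreachable: i < len(s)
      | some ci =>
        if ci ≠ '$' then
          tokenReplaceGo cs d fuel (i + 1) (i + 2) (result ++ [String.ofList [ci]])
        else
          match PySem.List.pyGet? cs (j : Int) with
          | none => result    -- Python raises IndexError here (excluded by Pre_)
          | some cj =>
            if cj ≠ '$' then
              tokenReplaceGo cs d fuel i (j + 1) result
            else
              match d.get? (String.ofList (PySem.List.slice cs (some (i : Int)) (some ((j : Int) + 1)))) with
              | none => result  -- Python raises KeyError here (excluded by Pre_)
              | some v => tokenReplaceGo cs d fuel (j + 1) (j + 2) (result ++ [v])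
    else result

def token_replace (s : String) (tokens : List (String × String)) : String :=
  PySem.Str.join "" (tokenReplaceGo s.toList (PySem.Dict.ofList tokens) (2 * s.toList.length + 2) 0 1 [])

-- ===== PORT B =====
-- parts[1::2] / parts[2::2]: stride-2 slicing, ported by hand (exact: every other element
-- starting at the head of the dropped prefix).
def everyOther {α : Type} : List α → List α
  | [] => []
  | [x] => [x]
  | x :: _ :: rest => x :: everyOther rest

-- Source B's loop body: out.append(tokens['$'+tok+'$']); out.append(lit).
-- d.get? …getD "": Python's tokens[…] raises KeyError on a missing key (excluded by Pre_).
def token_replace_alt (s : String) (tokens : List (String × String)) : String :=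
  match PySem.Str.split? s "$" with
  | none => ""   -- unreachable: the separator "$" is nonempty
  | some parts =>
    let d := PySem.Dict.ofList tokens
    let out := (List.zip (everyOther (parts.drop 1)) (everyOther (parts.drop 2))).foldl
      (fun acc tl => acc ++ [((d.get? ("$" ++ tl.1 ++ "$")).getD ""), tl.2])
      [parts.headD ""]
    PySem.Str.join "" out

-- ===== PRECONDITION & SPEC =====
-- Pre_ = exactly the inputs where Python A returns: the number of '$' is even (odd split-part
-- count; otherwise IndexError) and every odd-indexed split part is a known token (else KeyError).
def Pre_token_replace (s : String) (tokens : List (String × String)) : Prop :=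
  (PySem.Chars.splitOn s.toList ['$']).length % 2 = 1 ∧
  ∀ k, k < (PySem.Chars.splitOn s.toList ['$']).length → k % 2 = 1 →
    (PySem.Dict.ofList tokens).contains
      ("$" ++ String.ofList ((PySem.Chars.splitOn s.toList ['$']).getD k []) ++ "$") = true

instance (s : String) (tokens : List (String × String)) : Decidable (Pre_token_replace s tokens) := by
  unfold Pre_token_replace; infer_instance

def pvWitness_token_replace : String × (List (String × String)) :=
  ("hi $x$, bye $y$$x$", [("$x$", "there"), ("$y$", "now")])

def Spec_token_replace (s : String) (tokens : List (String × String)) (out : String) : Prop := out = token_replace_alt s tokens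
instance (s : String) (tokens : List (String × String)) (out : String) : Decidable (Spec_token_replace s tokens out) := by unfold Spec_token_replace; infer_instance

-- ===== CLAIM (what is proved, stated in full; the proofs are below) =====
def Claim_equal_token_replace : Prop := ∀ (s : String) (tokens : List (String × String)), Dom_token_replace s tokens → Pre_token_replace s tokens → Spec_token_replace s tokens (token_replace s tokens)

-- ===== LEMMAS AND PROOFS =====

-- structural single-char split: splitD cs = (head segment, remaining segments) w.r.t. '$'
def splitD : List Char → List Char × List (List Char)
  | [] => ([], [])
  | c :: rest =>
      let p := splitD rest
      if c = '$' then ([], p.1 :: p.2) else (c :: p.1, p.2)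

-- the key/evenness facts the loop needs about the segments after the head
def okT (d : PySem.Dict String String) : List (List Char) → Prop
  | [] => True
  | [_] => False
  | tok :: _ :: rest => d.get? ("$" ++ String.ofList tok ++ "$") ≠ none ∧ okT d rest

-- abstract rendering of the tail segments in (token, literal) pairs
def renderTokens (d : PySem.Dict String String) : List String → String
  | [] => ""
  | [_] => ""
  | tok :: lit :: rest =>
      ((d.get? ("$" ++ tok ++ "$")).getD "") ++ lit ++ renderTokens d rest

lemma splitD_go (fuel : Nat) :
    ∀ (l cur : List Char) (acc : List (List Char)), l.length < fuel →
      PySem.Chars.splitOn.go ['$'] fuel l cur acc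
        = acc.reverse ++ (cur.reverse ++ (splitD l).1) :: (splitD l).2 := by
  induction fuel with
  | zero => intro l cur acc h; omega
  | succ fuel ih =>
    intro l cur acc h
    match l with
    | [] => simp [PySem.Chars.splitOn.go, splitD]
    | c :: rest =>
      by_cases hc : c = '$'
      · subst hc
        have hpre : List.isPrefixOf ['$'] ('$' :: rest) = true := by
          simp [List.isPrefixOf]
        rw [PySem.Chars.splitOn.go]
        simp only [hpre, if_pos]
        have hd : List.drop (['$'] : List Char).length ('$' :: rest) = rest := rfl
        rw [hd, ih rest [] (cur.reverse :: acc) (by simp at h ⊢; omega)]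
        simp [splitD]
      · have hpre : List.isPrefixOf ['$'] (c :: rest) = false := by
          simp [List.isPrefixOf]
          exact fun he => hc he.symm
        rw [PySem.Chars.splitOn.go]
        simp only [hpre, Bool.false_eq_true, if_false]
        rw [ih rest (c :: cur) acc (by simp at h ⊢; omega)]
        simp only [splitD, if_neg hc]
        simp

lemma splitOn_eq_splitD (cs : List Char) :
    PySem.Chars.splitOn cs ['$'] = (splitD cs).1 :: (splitD cs).2 := by
  rw [PySem.Chars.splitOn, splitD_go (cs.length + 1) cs [] [] (by omega)]
  simp

-- decomposition of a list whose splitD tail is nonempty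
lemma splitD_decomp :
    ∀ (u : List Char) (h2 : List Char) (t2 : List (List Char)),
      (splitD u).2 = h2 :: t2 →
      '$' ∉ (splitD u).1 ∧ ∃ rest, u = (splitD u).1 ++ '$' :: rest ∧ splitD rest = (h2, t2) := by
  intro u
  induction u with
  | nil => intro h2 t2 h; simp [splitD] at h
  | cons c rest ih =>
    intro h2 t2 h
    by_cases hc : c = '$'
    · subst hc
      have hs1 : (splitD ('$' :: rest)).1 = [] := by simp [splitD]
      have hs2 : (splitD ('$' :: rest)).2 = (splitD rest).1 :: (splitD rest).2 := by simp [splitD]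
      rw [hs2] at h
      refine ⟨by rw [hs1]; simp, rest, by rw [hs1]; simp, ?_⟩
      exact Prod.ext (List.cons.inj h).1 (List.cons.inj h).2
    · have hs1 : (splitD (c :: rest)).1 = c :: (splitD rest).1 := by
        simp only [splitD, if_neg hc]
      have hs2 : (splitD (c :: rest)).2 = (splitD rest).2 := by
        simp only [splitD, if_neg hc]
      rw [hs2] at h
      obtain ⟨hni, rest', hr, hsp⟩ := ih h2 t2 h
      refine ⟨?_, rest', ?_, hsp⟩
      · rw [hs1]
        intro hmem
        rcases List.mem_cons.mp hmem with he | hm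
        · exact hc he.symm
        · exact hni hm
      · rw [hs1]
        simpa using hr

-- one character read off the front of a drop
lemma drop_cons_facts {cs t : List Char} {c : Char} {i : Nat}
    (h : cs.drop i = c :: t) :
    PySem.List.pyGet? cs (i : Int) = some c ∧ cs.drop (i + 1) = t := by
  constructor
  · rw [PySem.List.pyGet?_natCast]
    have h0 : cs[i + 0]? = some c := by
      rw [← List.getElem?_drop, h]; rfl
    simpa using h0
  · have : cs.drop (i + 1) = List.drop 1 (cs.drop i) := by
      rw [List.drop_drop]
    rw [this, h]
    rfl

-- join with empty separator is flatten
lemma chars_join_nil_sep : ∀ ps : List (List Char), PySem.Chars.join [] ps = ps.flatten := by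
  intro ps
  induction ps with
  | nil => exact PySem.Chars.join_nil []
  | cons p ps ih =>
    match ps with
    | [] => rw [PySem.Chars.join_singleton]; simp
    | q :: rest => rw [PySem.Chars.join_cons_cons, ih]; simp

lemma join_append_singleton (ls : List String) (x : String) :
    PySem.Str.join "" (ls ++ [x]) = PySem.Str.join "" ls ++ x := by
  simp only [PySem.Str.join]
  have : ("" : String).toList = [] := rfl
  simp [this, chars_join_nil_sep, String.ofList_append, String.ofList_toList]

lemma join_nil_str : PySem.Str.join "" [] = "" := by
  simp only [PySem.Str.join, List.map_nil, PySem.Chars.join_nil]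

-- the inner j-scan of A: from j = i+1+k it walks to the closing '$' and consumes the token
lemma scan_lemma (cs : List Char) (d : PySem.Dict String String)
    (i : Nat) (mid rest : List Char) (hmid : '$' ∉ mid)
    (hdrop : cs.drop i = '$' :: (mid ++ '$' :: rest)) :
    ∀ n k res f, k ≤ mid.length → n = mid.length - k →
      tokenReplaceGo cs d (f + (mid.length - k) + 1) i (i + 1 + k) res
        = match d.get? (String.ofList ('$' :: mid ++ ['$'])) with
          | none => res
          | some v => tokenReplaceGo cs d f (i + mid.length + 2) (i + mid.length + 3) (res ++ [v]) := by
  intro n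
  induction n with
  | zero =>
    intro k res f hk hn
    have hkm : k = mid.length := by omega
    subst hkm
    obtain ⟨hgi, hdi⟩ := drop_cons_facts hdrop
    have hlen : i < cs.length := by
      have := congrArg List.length hdrop
      simp at this; omega
    have hdj : cs.drop (i + 1 + mid.length) = '$' :: rest := by
      have : cs.drop (i + 1 + mid.length) = List.drop mid.length (cs.drop (i+1)) := by
        rw [List.drop_drop]
      rw [this, hdi, List.drop_append_of_le_length (le_refl _)]
      simp
    obtain ⟨hgj, _⟩ := drop_cons_facts hdj
    have hslice : PySem.List.slice cs (some (i : Int)) (some (((i + 1 + mid.length : Nat) : Int) + 1))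
        = '$' :: mid ++ ['$'] := by
      have : ((i + 1 + mid.length : Nat) : Int) + 1 = ((i + mid.length + 2 : Nat) : Int) := by
        push_cast; ring
      rw [this, PySem.List.slice_natCast, hdrop]
      have h2 : i + mid.length + 2 - i = mid.length + 2 := by omega
      rw [h2]
      rw [List.take_succ_cons]
      have : List.take (mid.length + 1) (mid ++ '$' :: rest) = mid ++ ['$'] := by
        rw [List.take_append]
        simp
      rw [this]
      simp
    simp only [Nat.sub_self, Nat.add_zero]
    rw [tokenReplaceGo]
    simp only [hlen, if_pos, hgi]
    simp only [if_neg (by simp : ¬('$' ≠ '$'))]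
    rw [hgj]
    simp only [if_neg (by simp : ¬('$' ≠ '$'))]
    rw [hslice]
    match hg : d.get? (String.ofList ('$' :: mid ++ ['$'])) with
    | none => simp
    | some v =>
      simp only []
      have e1 : i + 1 + mid.length + 1 = i + mid.length + 2 := by omega
      have e2 : i + 1 + mid.length + 2 = i + mid.length + 3 := by omega
      rw [e1, e2]
  | succ n ih =>
    intro k res f hk hn
    have hklt : k < mid.length := by omega
    obtain ⟨hgi, hdi⟩ := drop_cons_facts hdrop
    have hlen : i < cs.length := by
      have := congrArg List.length hdrop
      simp at this; omega
    have hdj : cs.drop (i + 1 + k) = mid.drop k ++ '$' :: rest := by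
      have : cs.drop (i + 1 + k) = List.drop k (cs.drop (i+1)) := by
        rw [List.drop_drop]
      rw [this, hdi, List.drop_append_of_le_length (le_of_lt hklt)]
    obtain ⟨ck, hck, hmidk⟩ : ∃ ck, mid.drop k = ck :: mid.drop (k+1) ∧ ck ∈ mid := by
      have h1 : k < mid.length := hklt
      refine ⟨mid[k], ?_, List.getElem_mem h1⟩
      rw [List.drop_eq_getElem_cons h1]
    have hckne : ck ≠ '$' := fun he => hmid (he ▸ hmidk)
    rw [hck] at hdj
    obtain ⟨hgj, _⟩ := drop_cons_facts (show cs.drop (i + 1 + k) = ck :: (mid.drop (k+1) ++ '$' :: rest) by rw [hdj]; simp)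
    have hfuel : f + (mid.length - k) + 1 = (f + (mid.length - (k + 1)) + 1) + 1 := by omega
    rw [hfuel, tokenReplaceGo]
    simp only [hlen, if_pos, hgi]
    simp only [if_neg (by simp : ¬('$' ≠ '$'))]
    rw [hgj]
    simp only [if_pos hckne]
    have : i + 1 + k + 1 = i + 1 + (k + 1) := by omega
    rw [this]
    exact ih (k+1) res f (by omega) (by omega)

-- the main loop lemma: from a fresh state (i, i+1) A produces head segment + rendered pairs
lemma loop_lemma (cs : List Char) (d : PySem.Dict String String) :
    ∀ f t i res, cs.drop i = t → okT d (splitD t).2 → t.length + 1 ≤ f →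
      PySem.Str.join "" (tokenReplaceGo cs d f i (i + 1) res)
        = PySem.Str.join "" res ++ String.ofList (splitD t).1
            ++ renderTokens d ((splitD t).2.map String.ofList) := by
  intro f
  induction f using Nat.strong_induction_on with
  | _ f ih =>
    intro t i res hdrop hok hf
    match f, t with
    | f + 1, [] =>
      have hlen : cs.length ≤ i := List.drop_eq_nil_iff.mp hdrop
      rw [tokenReplaceGo]
      simp only [if_neg (by omega : ¬ i < cs.length)]
      simp [splitD, renderTokens]
    | f + 1, c :: u =>
      obtain ⟨hgi, hdi⟩ := drop_cons_facts hdrop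
      have hlen : i < cs.length := by
        have := congrArg List.length hdrop
        simp at this; omega
      by_cases hc : c = '$'
      · subst hc
        -- token case
        have hsp : splitD ('$' :: u) = ([], (splitD u).1 :: (splitD u).2) := by
          simp [splitD]
        rw [hsp] at hok ⊢
        match hu2 : (splitD u).2 with
        | [] => rw [hu2] at hok; exact absurd hok (by simp [okT])
        | lit :: rest2 =>
          rw [hu2] at hok
          obtain ⟨hkey, hok2⟩ := hok
          obtain ⟨hnomid, rest, hurest, hsprest⟩ := splitD_decomp u lit rest2 hu2
          have hdrop2 : cs.drop i = '$' :: ((splitD u).1 ++ '$' :: rest) := by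
            rw [hdrop]
            exact congrArg (List.cons '$') hurest
          have hflen : (splitD u).1.length + rest.length + 2 ≤ u.length + 1 := by
            have := congrArg List.length hurest
            simp at this; omega
          have hfsplit : f + 1 = (f - (splitD u).1.length) + ((splitD u).1.length - 0) + 1 := by
            simp at hf; omega
          have := scan_lemma cs d i (splitD u).1 rest hnomid hdrop2
            ((splitD u).1.length - 0) 0 res (f - (splitD u).1.length) (by omega) rfl
          rw [Nat.add_zero] at this  -- i + 1 + 0 = i + 1
          rw [hfsplit, this]
          have hkeyeq : String.ofList ('$' :: (splitD u).1 ++ ['$'])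
              = "$" ++ String.ofList (splitD u).1 ++ "$" := by
            have : ('$' :: (splitD u).1 ++ ['$']) = ['$'] ++ (splitD u).1 ++ ['$'] := by simp
            rw [this, String.ofList_append, String.ofList_append]
          match hg : d.get? ("$" ++ String.ofList (splitD u).1 ++ "$") with
          | none => exact absurd hg hkey
          | some v =>
            rw [hkeyeq, hg]
            have hdroprest : cs.drop (i + (splitD u).1.length + 2) = rest := by
              have : cs.drop (i + (splitD u).1.length + 2)
                  = List.drop ((splitD u).1.length + 2) (cs.drop i) := by
                rw [List.drop_drop]; ring_nf
              rw [this, hdrop2]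
              simp
            have e3 : i + (splitD u).1.length + 3 = (i + (splitD u).1.length + 2) + 1 := by omega
            rw [e3]
            rw [ih (f - (splitD u).1.length) (by omega) rest _ (res ++ [v]) hdroprest
              (by rw [hsprest]; exact hok2) (by simp at hf; omega)]
            rw [join_append_singleton, hsprest]
            simp only [List.map_cons, renderTokens, hg, Option.getD_some]
            have hnil : String.ofList ([] : List Char) = "" := rfl
            rw [hnil]
            simp [String.append_assoc]
      · -- literal character case
        have hsp : splitD (c :: u) = (c :: (splitD u).1, (splitD u).2) := by
          simp [splitD, hc]
        rw [hsp] at hok ⊢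
        rw [tokenReplaceGo]
        simp only [hlen, if_pos, hgi]
        simp only [if_pos hc]
        have : i + 2 = (i + 1) + 1 := by omega
        rw [this]
        rw [ih f (by omega) u (i+1) (res ++ [String.ofList [c]]) hdi hok (by simp at hf; omega)]
        rw [join_append_singleton]
        have : String.ofList [c] ++ String.ofList (splitD u).1 = String.ofList (c :: (splitD u).1) := by
          rw [← String.ofList_append]; rfl
        rw [← this]
        simp [String.append_assoc]

-- Pre_'s indexed key condition implies okT of the tail segments
lemma okT_of_indexed (d : PySem.Dict String String) :
    ∀ (n : Nat) (tl : List (List Char)), tl.length ≤ n → tl.length % 2 = 0 →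
      (∀ k, k < tl.length → k % 2 = 0 →
        d.contains ("$" ++ String.ofList (tl.getD k []) ++ "$") = true) →
      okT d tl := by
  intro n
  induction n with
  | zero =>
    intro tl hle _ _
    match tl with
    | [] => trivial
    | _ :: _ => simp at hle
  | succ n ihn =>
    intro tl hle hlen hkeys
    match tl with
    | [] => trivial
    | [x] => simp at hlen
    | tok :: lit :: rest =>
      refine ⟨?_, ?_⟩
      · have h0 := hkeys 0 (by simp) (by omega)
        simp only [List.getD_cons_zero] at h0
        intro hnone
        rw [PySem.Dict.get?_eq_none_iff_contains, h0] at hnone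
        simp at hnone
      · apply ihn rest (by simp at hle ⊢; omega)
        · simp at hlen ⊢; omega
        · intro k hk hk2
          have := hkeys (k + 2) (by simp at hk ⊢; omega) (by omega)
          simpa using this

-- B's zipped-pairs fold equals the abstract pairwise rendering, for every tail
lemma fold_pairs_eq_render (d : PySem.Dict String String) :
    ∀ (tl acc : List String),
      PySem.Str.join "" ((List.zip (everyOther tl) (everyOther (tl.drop 1))).foldl
          (fun acc tl => acc ++ [((d.get? ("$" ++ tl.1 ++ "$")).getD ""), tl.2]) acc)
        = PySem.Str.join "" acc ++ renderTokens d tl := by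
  intro tl
  induction tl using everyOther.induct with
  | case1 => intro acc; simp [everyOther, renderTokens]
  | case2 x => intro acc; simp [everyOther, renderTokens]
  | case3 tok lit rest ih =>
    intro acc
    have hz : List.zip (everyOther (tok :: lit :: rest)) (everyOther ((tok :: lit :: rest).drop 1))
        = (tok, lit) :: List.zip (everyOther rest) (everyOther (rest.drop 1)) := by
      match rest with
      | [] => rfl
      | [y] => rfl
      | y :: z :: r => rfl
    rw [hz, List.foldl_cons, ih]
    have : acc ++ [((d.get? ("$" ++ tok ++ "$")).getD ""), lit]
        = (acc ++ [((d.get? ("$" ++ tok ++ "$")).getD "")]) ++ [lit] := by simp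
    rw [this, join_append_singleton, join_append_singleton]
    simp [renderTokens, String.append_assoc]

lemma B_characterization (s : String) (tokens : List (String × String)) :
    token_replace_alt s tokens
      = String.ofList (splitD s.toList).1
        ++ renderTokens (PySem.Dict.ofList tokens) ((splitD s.toList).2.map String.ofList) := by
  unfold token_replace_alt
  have hsep : ("$" : String).toList = ['$'] := rfl
  rw [PySem.Str.split?]
  rw [hsep, PySem.Chars.split?]
  simp only [List.isEmpty_cons, Bool.false_eq_true, if_false, Option.map_some]
  rw [splitOn_eq_splitD]
  simp only [List.map_cons, List.headD_cons, List.drop_succ_cons, List.drop_zero]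
  have := fold_pairs_eq_render (PySem.Dict.ofList tokens)
    ((splitD s.toList).2.map String.ofList) [String.ofList (splitD s.toList).1]
  rw [this]
  have : PySem.Str.join "" [String.ofList (splitD s.toList).1]
      = String.ofList (splitD s.toList).1 := by
    have h := join_append_singleton [] (String.ofList (splitD s.toList).1)
    simpa [join_nil_str] using h
  rw [this]

-- ===== VERDICT (by name: the statement is the Claim_ definition above) =====
theorem token_replace_spec : Claim_equal_token_replace := by
  intro s tokens _hdom hpre
  unfold Spec_token_replace
  obtain ⟨hodd, hkeys⟩ := hpre
  rw [splitOn_eq_splitD] at hodd hkeys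
  rw [B_characterization]
  unfold token_replace
  have hok : okT (PySem.Dict.ofList tokens) (splitD s.toList).2 := by
    apply okT_of_indexed _ (splitD s.toList).2.length _ (le_refl _)
    · simp at hodd; omega
    · intro k hk hk2
      have := hkeys (k + 1) (by simp; omega) (by omega)
      simpa using this
  have := loop_lemma s.toList (PySem.Dict.ofList tokens)
    (2 * s.toList.length + 2) s.toList 0 [] (by simp) hok (by omega)
  simp only [Nat.zero_add] at this
  rw [this, join_nil_str]
  simp
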